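-- pv_equiv track=rewrite | github.com/ApprenticeYu/Leetcode | Python_version/只出现一次的数字II.py | only_once_2
-- ===== SOURCE A (Python) =====
-- def only_once_2(nums):
--     ans = 0
--     for i in range(32):
--         total = sum((num >> i) & 1 for num in nums)
--         if total % 3:
--             if i == 31:
--                 ans -= (1 << i)
--             else:
--                 ans |= (1 << i)
--     return ans
-- ===== SOURCE B (Python) =====
-- def only_once_2(nums):
--     # Single pass: ones/twos hold the bits whose count so far is 1 resp. 2 mod 3,
--     # kept within 32 bits; reinterpret the 32-bit result as signed at the end.
--     MASK = 0xFFFFFFFF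
--     ones = twos = 0
--     for num in nums:
--         n = num & MASK
--         ones = (ones ^ n) & ~twos & MASK
--         twos = (twos ^ n) & ~ones & MASK
--     res = ones | twos
--     return res - (1 << 32) if res >= (1 << 31) else res
-- ===== Notes on version B (the rewrite author's own statement) =====
-- stated objective: faster
-- what changed: Replaces A's 32 separate counting passes over the list (one per bit position, summing each bit and testing the count mod 3) with a single pass that keeps two 32-bit masks ones/twos recording, per bit, whether its count so far is 1 or 2 mod 3, followed by one 32-bit signed reinterpretation at the end.
import Mathlib
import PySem

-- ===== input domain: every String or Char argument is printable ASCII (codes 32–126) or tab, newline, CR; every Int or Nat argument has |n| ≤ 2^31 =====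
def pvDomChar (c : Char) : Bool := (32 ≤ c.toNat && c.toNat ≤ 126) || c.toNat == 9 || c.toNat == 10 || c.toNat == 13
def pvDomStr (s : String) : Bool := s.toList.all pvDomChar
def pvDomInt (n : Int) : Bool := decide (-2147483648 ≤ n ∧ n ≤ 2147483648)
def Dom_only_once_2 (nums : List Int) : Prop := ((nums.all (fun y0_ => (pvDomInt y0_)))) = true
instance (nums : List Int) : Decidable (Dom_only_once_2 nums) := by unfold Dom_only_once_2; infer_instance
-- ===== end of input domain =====

-- B replaces A's 32 per-bit counting passes by one single pass keeping mod-3 bit states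
-- (ones/twos masks) and a final 32-bit sign fixup; equivalence of RETURN values is proved
-- for all integer lists.

-- ===== PORT A =====
-- `sum(gen)` is a left fold from 0; the loop index i of range(32) is a nonnegative Int,
-- so `num >> i` / `1 << i` are ported with the shift amount `i.toNat` (exact for 0 ≤ i);
-- `if total % 3:` is Python truthiness, i.e. the remainder is nonzero.
def only_once_2 (nums : List Int) : Int :=
  (PySem.List.pyRange 0 32 1).foldl (fun (ans : Int) (i : Int) =>
    let total : Int := nums.foldl (fun (s : Int) (num : Int) => s + Int.land (num >>> i.toNat) 1) 0
    if PySem.Int.mod total 3 ≠ 0 then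
      if i == 31 then ans - (1 <<< i.toNat) else Int.lor ans (1 <<< i.toNat)
    else ans) 0

-- ===== PORT B =====
-- `&`, `^`, `|`, `~` on Python ints are exactly Int.land / Int.xor / Int.lor / ~~~ (two's complement).
def only_once_2_alt (nums : List Int) : Int :=
  let mask : Int := 0xFFFFFFFF
  let p := nums.foldl (fun (p : Int × Int) num =>
      let n := Int.land num mask
      let ones := Int.land (Int.land (Int.xor p.1 n) (~~~p.2)) mask
      let twos := Int.land (Int.land (Int.xor p.2 n) (~~~ones)) mask
      (ones, twos)) ((0:Int), (0:Int))
  let res := Int.lor p.1 p.2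
  if res ≥ (1 <<< (31:Nat)) then res - (1 <<< (32:Nat)) else res

-- ===== PRECONDITION & SPEC =====
def Spec_only_once_2 (nums : List Int) (out : Int) : Prop := out = only_once_2_alt nums
instance (nums : List Int) (out : Int) : Decidable (Spec_only_once_2 nums out) := by unfold Spec_only_once_2; infer_instance

-- ===== CLAIM (what is proved, stated in full; the proofs are below) =====
def Claim_equal_only_once_2 : Prop := ∀ (nums : List Int), Dom_only_once_2 nums → Spec_only_once_2 nums (only_once_2 nums)

-- ===== LEMMAS AND PROOFS =====

/-- number of elements of `l` whose bit `k` is set -/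
def pvCnt (l : List Int) (k : Nat) : Nat := l.countP (fun num => num.testBit k)

theorem pvCnt_concat (l : List Int) (x : Int) (k : Nat) :
    pvCnt (l ++ [x]) k = pvCnt l k + (if x.testBit k then 1 else 0) := by
  simp [pvCnt, List.countP_append, List.countP_cons]

theorem pv_not_eq_lnot (x : Int) : ~~~x = Int.lnot x := by
  cases x <;> rfl

theorem pv_mask_testBit (k : Nat) : (0xFFFFFFFF : Int).testBit k = decide (k < 32) := by
  have : (0xFFFFFFFF : Int) = Int.ofNat (2 ^ 32 - 1) := by decide
  rw [this]
  show Nat.testBit (2 ^ 32 - 1) k = decide (k < 32)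
  exact Nat.testBit_two_pow_sub_one 32 k

/-- B's loop body. -/
def pvStep (p : Int × Int) (num : Int) : Int × Int :=
  let n := Int.land num (0xFFFFFFFF : Int)
  let ones := Int.land (Int.land (Int.xor p.1 n) (~~~p.2)) (0xFFFFFFFF : Int)
  let twos := Int.land (Int.land (Int.xor p.2 n) (~~~ones)) (0xFFFFFFFF : Int)
  (ones, twos)

/-- invariant of B's fold: per-bit mod-3 state -/
def pvInv (l : List Int) (p : Int × Int) : Prop :=
  ∀ k : Nat, p.1.testBit k = (decide (k < 32) && decide (pvCnt l k % 3 = 1))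
    ∧ p.2.testBit k = (decide (k < 32) && decide (pvCnt l k % 3 = 2))

theorem pvInv_fold (l : List Int) : pvInv l (l.foldl pvStep (0, 0)) := by
  induction l using List.reverseRecOn with
  | nil =>
    intro k; simp [pvCnt, Int.testBit]
  | append_singleton l x ih =>
    rw [List.foldl_concat]
    intro k
    obtain ⟨h1, h2⟩ := ih k
    have hcnt := pvCnt_concat l x k
    set p := l.foldl pvStep (0, 0) with hp
    have hone : (pvStep p x).1.testBit k
        = (((Bool.xor (p.1.testBit k) (x.testBit k && decide (k < 32))) && !(p.2.testBit k)) && decide (k < 32)) := by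
      simp [pvStep, pv_not_eq_lnot, Int.testBit_land, Int.testBit_lxor, Int.testBit_lnot,
        pv_mask_testBit, Bool.and_comm, Bool.and_left_comm, Bool.and_assoc]
    have htwo : (pvStep p x).2.testBit k
        = (((Bool.xor (p.2.testBit k) (x.testBit k && decide (k < 32))) && !((pvStep p x).1.testBit k)) && decide (k < 32)) := by
      simp [pvStep, pv_not_eq_lnot, Int.testBit_land, Int.testBit_lxor, Int.testBit_lnot,
        pv_mask_testBit, Bool.and_comm, Bool.and_left_comm, Bool.and_assoc]
    rw [hone, htwo, h1, h2, hcnt]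
    by_cases hk : k < 32
    · have h3 : pvCnt l k % 3 = 0 ∨ pvCnt l k % 3 = 1 ∨ pvCnt l k % 3 = 2 := by omega
      by_cases hx : x.testBit k
      · rcases h3 with h | h | h <;>
          simp [hk, hx, h, Nat.add_mod, hone, h1, h2, hcnt]
      · rcases h3 with h | h | h <;>
          simp [hk, hx, h, hone, h1, h2, hcnt]
    · simp [hk]

/-- an Int whose bits vanish from 32 on is a Nat below 2^32 -/
theorem pv_int_of_bits (x : Int) (h : ∀ i : Nat, 32 ≤ i → x.testBit i = false) :
    ∃ X : Nat, x = Int.ofNat X ∧ X < 2 ^ 32 := by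
  cases x with
  | ofNat m =>
    refine ⟨m, rfl, Nat.lt_pow_two_of_testBit m ?_⟩
    intro i hi
    exact h i hi
  | negSucc m =>
    exfalso
    have h1 : m < 2 ^ (32 + m) := by
      calc m < 2 ^ m := Nat.lt_two_pow_self
      _ ≤ 2 ^ (32 + m) := Nat.pow_le_pow_right (by norm_num) (by omega)
    have h2 : Nat.testBit m (32 + m) = false := Nat.testBit_lt_two_pow h1
    have h3 := h (32 + m) (by omega)
    simp [Int.testBit, h2] at h3

theorem pv_bit_sum (num : Int) (i : Nat) :
    Int.land (num >>> i) 1 = if num.testBit i then 1 else 0 := by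
  cases num with
  | ofNat m =>
    have h1 : Int.land (Int.ofNat m >>> i) 1 = Int.ofNat ((m >>> i) &&& 1) := rfl
    have h2 : Int.testBit (Int.ofNat m) i = Nat.testBit m i := rfl
    rw [h1, h2, Nat.and_one_is_mod, Nat.shiftRight_eq_div_pow, Nat.testBit_eq_decide_div_mod_eq]
    generalize m / 2 ^ i = q
    by_cases h : q % 2 = 1
    · simp [h, Int.ofNat_eq_natCast]
    · have h0 : q % 2 = 0 := by omega
      simp [h, h0, Int.ofNat_eq_natCast]
  | negSucc m =>
    have h1 : Int.land (Int.negSucc m >>> i) 1 = Int.ofNat (Nat.ldiff 1 (m >>> i)) := rfl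
    have h2 : Int.testBit (Int.negSucc m) i = !(Nat.testBit m i) := rfl
    have h3 : Nat.ldiff 1 (m >>> i) = if Nat.testBit m i then 0 else 1 := by
      apply Nat.eq_of_testBit_eq
      intro j
      have h4 : Nat.testBit 1 j = decide (j = 0) := by
        have := Nat.testBit_two_pow (n := 0) (m := j); simpa [eq_comm] using this
      rw [Nat.testBit_ldiff, h4]
      by_cases hj : j = 0 <;> by_cases hm : Nat.testBit m i <;>
        simp [h4, hj, hm, Nat.testBit_shiftRight]
    rw [h1, h2, h3]
    by_cases hm : Nat.testBit m i <;> simp [hm]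

theorem pv_total (nums : List Int) (i : Nat) : ∀ s : Int,
    nums.foldl (fun (s : Int) (num : Int) => s + Int.land (num >>> i) 1) s = s + (pvCnt nums i : Int) := by
  induction nums with
  | nil => intro s; simp [pvCnt]
  | cons x l ih =>
    intro s
    rw [List.foldl_cons, ih, pv_bit_sum]
    have : pvCnt (x :: l) i = (if x.testBit i then 1 else 0) + pvCnt l i := by
      simp [pvCnt, List.countP_cons, Nat.add_comm]
    rw [this]
    push_cast
    split <;> ring

/-- A's loop body (the fold in `only_once_2` is definitionally this step). -/
def pvStepA (nums : List Int) (ans : Int) (i : Int) : Int :=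
  if PySem.Int.mod (nums.foldl (fun (s : Int) (num : Int) => s + Int.land (num >>> i.toNat) 1) 0) 3 ≠ 0 then
    if i == 31 then ans - (1 <<< i.toNat) else Int.lor ans (1 <<< i.toNat)
  else ans

theorem pv_only_once_eq (nums : List Int) :
    only_once_2 nums = (PySem.List.pyRange 0 32 1).foldl (pvStepA nums) 0 := rfl

theorem pv_mod3 (c : Nat) : PySem.Int.mod (c : Int) 3 = ((c % 3 : Nat) : Int) := by
  simp [PySem.Int.mod, Int.fmod_eq_emod]

theorem pv_shl_nat (j : Nat) : (1 <<< j : Nat) = 2 ^ j := by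
  simp [Nat.shiftLeft_eq]

theorem pvStepA_lt (nums : List Int) (j : Nat) (hj : j < 31) (a : Int) :
    pvStepA nums a (Int.ofNat j)
      = if pvCnt nums j % 3 ≠ 0 then Int.lor a (Int.ofNat (2 ^ j)) else a := by
  have htot : nums.foldl (fun (s : Int) (num : Int) => s + Int.land (num >>> j) 1) 0
      = (pvCnt nums j : Int) := by
    have := pv_total nums j 0
    simpa using this
  have hne : ((Int.ofNat j) == (31 : Int)) = false := by simp; omega
  have htn : (Int.ofNat j).toNat = j := rfl
  unfold pvStepA
  rw [htn, htot, pv_mod3, hne, pv_shl_nat]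
  simp only [ne_eq, Nat.cast_eq_zero]
  by_cases hc : pvCnt nums j % 3 = 0 <;>
    simp [hc, Int.ofNat_eq_natCast]

theorem pvStepA_31 (nums : List Int) (a : Int) :
    pvStepA nums a (Int.ofNat 31)
      = if pvCnt nums 31 % 3 ≠ 0 then a - Int.ofNat (2 ^ 31) else a := by
  have htot : nums.foldl (fun (s : Int) (num : Int) => s + Int.land (num >>> (31:Nat)) 1) 0
      = (pvCnt nums 31 : Int) := by
    have := pv_total nums 31 0
    simpa using this
  have h31 : ((Int.ofNat 31) == (31 : Int)) = true := rfl
  have htn : (Int.ofNat 31).toNat = 31 := rfl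
  unfold pvStepA
  rw [htn, htot, pv_mod3, h31, pv_shl_nat]
  simp only [ne_eq, Nat.cast_eq_zero]
  by_cases hc : pvCnt nums 31 % 3 = 0 <;>
    simp [hc, Int.ofNat_eq_natCast]

theorem pv_or_pow (R k : Nat) (htb : R.testBit k = true) :
    (R % 2 ^ k) ||| 2 ^ k = R % 2 ^ (k + 1) := by
  apply Nat.eq_of_testBit_eq
  intro j
  rw [Nat.testBit_lor, Nat.testBit_mod_two_pow, Nat.testBit_mod_two_pow, Nat.testBit_two_pow]
  rcases lt_trichotomy j k with h | h | h
  · simp [h, Nat.lt_succ_of_lt h]; omega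
  · subst h; simp [htb]
  · have h1 : ¬ j < k := by omega
    have h2 : ¬ j < k + 1 := by omega
    simp [h1, h2]; omega

theorem pv_mod_succ (R k : Nat) : R % 2 ^ (k + 1) = R % 2 ^ k + 2 ^ k * (R / 2 ^ k % 2) := by
  rw [pow_succ, Nat.mod_mul]

/-- A's fold over the first k bit positions equals the low k bits of R. -/
theorem pvA_partial (nums : List Int) (R : Nat)
    (hR : ∀ idx : Nat, R.testBit idx = (decide (idx < 32) && decide (pvCnt nums idx % 3 ≠ 0))) :
    ∀ k : Nat, k ≤ 31 →
      (PySem.List.pyRange 0 (Int.ofNat k) 1).foldl (pvStepA nums) 0 = Int.ofNat (R % 2 ^ k) := by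
  intro k
  induction k with
  | zero =>
    intro _
    rw [PySem.List.pyRange_one_eq_nil (by norm_num)]
    simp
  | succ k ih =>
    intro hk
    have hk' : k ≤ 31 := by omega
    have hsplit : PySem.List.pyRange 0 (Int.ofNat (k + 1)) 1
        = PySem.List.pyRange 0 (Int.ofNat k) 1 ++ [Int.ofNat k] := by
      have := PySem.List.pyRange_one_succ_right (a := 0) (b := Int.ofNat k)
        (by simp)
      simpa [Int.ofNat_eq_natCast] using this
    rw [hsplit, List.foldl_concat, ih hk', pvStepA_lt nums k (by omega)]
    have htb : R.testBit k = decide (pvCnt nums k % 3 ≠ 0) := by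
      rw [hR k]
      have : k < 32 := by omega
      simp [this]
    by_cases hc : pvCnt nums k % 3 = 0
    · have hb : R.testBit k = false := by simp [htb, hc]
      have hdiv : R / 2 ^ k % 2 = 0 := by
        have := (Nat.testBit_eq_decide_div_mod_eq (x := R) (i := k)).symm.trans hb
        simp at this; omega
      rw [pv_mod_succ]
      simp [hc, hdiv]
    · have hb : R.testBit k = true := by simp [htb, hc]
      have hlor : Int.lor (Int.ofNat (R % 2 ^ k)) (Int.ofNat (2 ^ k))
          = Int.ofNat ((R % 2 ^ k) ||| 2 ^ k) := rfl
      simp only [hc, ne_eq, not_false_iff, if_true]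
      rw [hlor, pv_or_pow R k hb]

-- ===== VERDICT (by name: the statement is the Claim_ definition above) =====
theorem only_once_2_spec : Claim_equal_only_once_2 := by
  intro nums _
  unfold Spec_only_once_2
  have hinv := pvInv_fold nums
  set p := nums.foldl pvStep (0, 0) with hp
  -- the 32-bit result word
  have hbits : ∀ k : Nat, (Int.lor p.1 p.2).testBit k
      = (decide (k < 32) && decide (pvCnt nums k % 3 ≠ 0)) := by
    intro k
    obtain ⟨h1, h2⟩ := hinv k
    rw [Int.testBit_lor, h1, h2]
    by_cases hk : k < 32
    · have h3 : pvCnt nums k % 3 = 0 ∨ pvCnt nums k % 3 = 1 ∨ pvCnt nums k % 3 = 2 := by omega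
      rcases h3 with h | h | h <;> simp [hk, h]
    · simp [hk]
  obtain ⟨R, hres, hRlt⟩ := pv_int_of_bits (Int.lor p.1 p.2) (by
    intro i hi
    rw [hbits i]
    simp; omega)
  have hR : ∀ idx : Nat, R.testBit idx = (decide (idx < 32) && decide (pvCnt nums idx % 3 ≠ 0)) := by
    intro idx
    have h0 : (Int.ofNat R).testBit idx = R.testBit idx := rfl
    rw [← h0, ← hres, hbits idx]
  -- A's side
  have hA : only_once_2 nums
      = pvStepA nums (Int.ofNat (R % 2 ^ 31)) (Int.ofNat 31) := by
    rw [pv_only_once_eq]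
    have hsplit : PySem.List.pyRange 0 32 1
        = PySem.List.pyRange 0 (Int.ofNat 31) 1 ++ [Int.ofNat 31] := by
      have := PySem.List.pyRange_one_succ_right (a := 0) (b := (31 : Int)) (by norm_num)
      norm_num [Int.ofNat_eq_natCast] at this ⊢
      exact this
    rw [hsplit, List.foldl_concat, pvA_partial nums R hR 31 (by norm_num)]
  -- B's side
  have hB : only_once_2_alt nums
      = if Int.lor p.1 p.2 ≥ ((1 <<< 31 : Nat) : Int)
          then Int.lor p.1 p.2 - ((1 <<< 32 : Nat) : Int) else Int.lor p.1 p.2 := rfl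
  have htb31 : R.testBit 31 = decide (pvCnt nums 31 % 3 ≠ 0) := by
    rw [hR 31]; simp
  have hdm : R.testBit 31 = decide (R / 2 ^ 31 % 2 = 1) := Nat.testBit_eq_decide_div_mod_eq
  have e31 : (2:Nat) ^ 31 = 2147483648 := by norm_num
  have e32 : (2:Nat) ^ 32 = 4294967296 := by norm_num
  rw [hA, pvStepA_31, hB, hres, pv_shl_nat, pv_shl_nat]
  rw [e31, e32] at *
  by_cases hc : pvCnt nums 31 % 3 = 0
  · -- high bit clear: R < 2^31, both sides are R
    have hb : R / 2147483648 % 2 = 0 := by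
      rw [htb31] at hdm
      simp [hc] at hdm; omega
    have hmod : R % 2147483648 = R := by omega
    rw [if_neg (by simp [hc]), hmod,
      if_neg (by simp [Int.ofNat_eq_natCast]; omega)]
  · -- high bit set: A returns R % 2^31 - 2^31, B returns R - 2^32
    have hb : R / 2147483648 % 2 = 1 := by
      rw [htb31] at hdm
      simp [hc] at hdm; omega
    have hge : 2147483648 ≤ R := by omega
    rw [if_pos (by simp [hc]), if_pos (by simp [Int.ofNat_eq_natCast]; omega)]
    simp [Int.ofNat_eq_natCast]
    omega
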